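-- pv_equiv track=rewrite | github.com/monzag/territory-analysis-and-statistics | view/view.py | draw_data_row
-- ===== SOURCE A (Python) =====
-- def find_max_string(data, index):
--     '''
--     Find max length of data in column.
--
--     Args:
--         data - list of lists
--         index - int
--
--     Returns:
--         length longest string - int
--     '''
--
--     longest_string = ''
--     for row in data:
--         if len(str(row[index])) > len(longest_string):
--             longest_string = str(row[index])
--
--     return len(longest_string)
--
-- def draw_data_row(data, row):
--     '''
--     Draw row with data (with proper width and format).
--
--     Args:
--         data - list of lists
--         row - list
--
--     Returns:
--         row_data - string
--     '''
--
--     row_data = '|'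
--     addit = 2
--     index = 0
--     for item in row:
--         max_string = find_max_string(data, index)
--         cell_width = max_string + addit
--         row_data = row_data + (str(item).center(cell_width, ' ')) + '|'
--         index += 1
--
--     return row_data
-- ===== SOURCE B (Python) =====
-- def draw_data_row(data, row):
--     # B: single row-major pass builds all column widths, then one formatting pass.
--     widths = [0] * len(row)
--     for r in data:
--         for i in range(len(widths)):
--             w = len(str(r[i]))
--             if w > widths[i]:
--                 widths[i] = w
--     out = '|'
--     for item, w in zip(row, widths):
--         out += str(item).center(w + 2, ' ') + '|'
--     return out
-- ===== Notes on version B (the rewrite author's own statement) =====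
-- stated objective: alternative
-- what changed: B replaces A's per-item call to find_max_string (a fresh column-major scan of the whole grid keeping the longest string) by one row-major pass that maintains a width table for all columns at once, followed by a separate zip-and-center formatting pass.
import Mathlib
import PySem

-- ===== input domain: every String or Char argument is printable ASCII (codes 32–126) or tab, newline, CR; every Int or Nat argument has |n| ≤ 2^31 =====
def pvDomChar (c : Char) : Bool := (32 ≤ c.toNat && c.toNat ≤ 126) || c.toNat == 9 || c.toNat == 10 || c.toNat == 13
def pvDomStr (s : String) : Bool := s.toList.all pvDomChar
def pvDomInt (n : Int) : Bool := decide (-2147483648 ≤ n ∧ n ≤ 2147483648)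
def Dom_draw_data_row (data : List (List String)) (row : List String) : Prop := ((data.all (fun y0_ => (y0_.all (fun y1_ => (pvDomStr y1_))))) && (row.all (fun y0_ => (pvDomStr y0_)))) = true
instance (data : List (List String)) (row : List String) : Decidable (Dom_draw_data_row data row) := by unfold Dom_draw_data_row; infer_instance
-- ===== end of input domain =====

-- B is a different decomposition (one row-major width-table pass, then a zip formatting pass); same exact output as A on Pre_.

-- exact port of Python's str.center(w, fill) over List Char (CPython: left margin gets the extra space rule marg//2 + (marg & w & 1))
def pvCenter (s : List Char) (w : Nat) (fill : Char) : List Char :=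
  if w ≤ s.length then s
  else
    let marg := w - s.length
    let left := marg / 2 + (marg &&& w &&& 1)
    List.replicate left fill ++ s ++ List.replicate (marg - left) fill

-- ===== PORT A =====
-- row[index] is in range on Pre_; the default "" of pyGetD is never used there (Python raises IndexError outside Pre_).
def find_max_string (data : List (List String)) (index : Nat) : Nat :=
  (data.foldl (fun (longest : List Char) r =>
      let cell := (PySem.List.pyGetD r (index : Int) "").toList
      if cell.length > longest.length then cell else longest) []).length

def draw_data_row (data : List (List String)) (row : List String) : String :=
  String.ofList (row.foldl (fun (st : List Char × Nat) item =>
      let max_string := find_max_string data st.2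
      let cell_width := max_string + 2
      (st.1 ++ pvCenter item.toList cell_width ' ' ++ ['|'], st.2 + 1)) (['|'], 0)).1

-- ===== PORT B =====
-- widths: one pass over data, updating every column's running maximum (inner Python loop = pointwise update).
def pvColWidths (data : List (List String)) (n : Nat) : List Nat :=
  data.foldl (fun ws r =>
      ws.zipIdx.map (fun p =>
        let w := (PySem.List.pyGetD r (p.2 : Int) "").toList.length
        if w > p.1 then w else p.1))
    (List.replicate n 0)

def draw_data_row_alt (data : List (List String)) (row : List String) : String :=
  String.ofList ((row.zip (pvColWidths data row.length)).foldl
      (fun acc p => acc ++ pvCenter p.1.toList (p.2 + 2) ' ' ++ ['|']) ['|'])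

-- ===== PRECONDITION & SPEC =====
-- Pre_ excludes exactly the ragged inputs on which A raises IndexError (some data row shorter than `row`).
def Pre_draw_data_row (data : List (List String)) (row : List String) : Prop :=
  ∀ r ∈ data, row.length ≤ r.length

instance (data : List (List String)) (row : List String) : Decidable (Pre_draw_data_row data row) := by
  unfold Pre_draw_data_row; infer_instance

def pvWitness_draw_data_row : List (List String) × List String :=
  ([["ab", "c"], ["x", "longer"]], ["u", "vv"])

def Spec_draw_data_row (data : List (List String)) (row : List String) (out : String) : Prop := out = draw_data_row_alt data row
instance (data : List (List String)) (row : List String) (out : String) : Decidable (Spec_draw_data_row data row out) := by unfold Spec_draw_data_row; infer_instance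

-- ===== CLAIM (what is proved, stated in full; the proofs are below) =====
def Claim_equal_draw_data_row : Prop := ∀ (data : List (List String)) (row : List String), Dom_draw_data_row data row → Pre_draw_data_row data row → Spec_draw_data_row data row (draw_data_row data row)

-- ===== LEMMAS AND PROOFS =====

-- cell length at column i
def pvCell (r : List String) (i : Nat) : Nat := (PySem.List.pyGetD r (i : Int) "").toList.length

-- the common column-width value
def pvMax (data : List (List String)) (i : Nat) : Nat :=
  data.foldl (fun m r => max m (pvCell r i)) 0

theorem find_max_string_aux (data : List (List String)) (i : Nat) :
    ∀ (acc : List Char),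
      (data.foldl (fun (longest : List Char) r =>
          let cell := (PySem.List.pyGetD r (i : Int) "").toList
          if cell.length > longest.length then cell else longest) acc).length
        = data.foldl (fun m r => max m (pvCell r i)) acc.length := by
  induction data with
  | nil => intro acc; simp
  | cons r rest ih =>
    intro acc
    simp only [List.foldl_cons]
    rw [ih]
    congr 1
    simp only [pvCell]
    split_ifs with h <;> omega

theorem find_max_string_eq (data : List (List String)) (i : Nat) :
    find_max_string data i = pvMax data i := by
  unfold find_max_string pvMax
  simpa using find_max_string_aux data i []

theorem colWidths_step (r : List String) (ws : List Nat) (i : Nat) :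
    (ws.zipIdx.map (fun p =>
        let w := (PySem.List.pyGetD r (p.2 : Int) "").toList.length
        if w > p.1 then w else p.1))[i]?
      = ws[i]?.map (fun v => max v (pvCell r i)) := by
  simp only [List.getElem?_map, List.getElem?_zipIdx, Nat.zero_add]
  cases h : ws[i]? with
  | none => simp
  | some v =>
    simp only [Option.map_some]
    congr 1
    simp only [pvCell]
    split_ifs with hc <;> omega

theorem colWidths_aux (data : List (List String)) :
    ∀ (ws : List Nat) (i : Nat),
      (data.foldl (fun ws r =>
          ws.zipIdx.map (fun p =>
            let w := (PySem.List.pyGetD r (p.2 : Int) "").toList.length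
            if w > p.1 then w else p.1)) ws)[i]?
        = ws[i]?.map (fun v => data.foldl (fun m r => max m (pvCell r i)) v) := by
  induction data with
  | nil => intro ws i; simp
  | cons r rest ih =>
    intro ws i
    simp only [List.foldl_cons]
    rw [ih, colWidths_step]
    cases h : ws[i]? <;> simp

theorem colWidths_get (data : List (List String)) (n i : Nat) (h : i < n) :
    (pvColWidths data n)[i]? = some (pvMax data i) := by
  unfold pvColWidths pvMax
  rw [colWidths_aux]
  simp [h]

theorem main_fold (data : List (List String)) :
    ∀ (row' : List String) (ws : List Nat) (acc : List Char) (k : Nat),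
      (∀ m < row'.length, ws[m]? = some (pvMax data (k + m))) →
      (row'.foldl (fun (st : List Char × Nat) item =>
          let max_string := find_max_string data st.2
          let cell_width := max_string + 2
          (st.1 ++ pvCenter item.toList cell_width ' ' ++ ['|'], st.2 + 1)) (acc, k)).1
        = (row'.zip ws).foldl (fun acc p => acc ++ pvCenter p.1.toList (p.2 + 2) ' ' ++ ['|']) acc := by
  intro row'
  induction row' with
  | nil => intro ws acc k _; simp
  | cons item rest ih =>
    intro ws acc k hws
    cases ws with
    | nil => exact absurd (hws 0 (by simp)) (by simp)
    | cons w ws' =>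
      have h0 := hws 0 (by simp)
      simp at h0
      simp only [List.zip_cons_cons, List.foldl_cons]
      rw [find_max_string_eq, h0]
      exact ih ws' _ (k + 1) (fun m hm => by
        have := hws (m + 1) (by simpa using Nat.succ_lt_succ hm)
        simpa [Nat.add_assoc, Nat.add_comm 1 m] using this)

-- ===== VERDICT (by name: the statement is the Claim_ definition above) =====
theorem draw_data_row_spec : Claim_equal_draw_data_row := by
  intro data row _ hpre
  unfold Spec_draw_data_row draw_data_row draw_data_row_alt
  congr 1
  exact main_fold data row (pvColWidths data row.length) ['|'] 0
    (fun m hm => by simpa using colWidths_get data row.length m hm)
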